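-- pv_equiv track=rewrite | github.com/wai-ad-astra/dance-convolution-backend | app.py | run_stats
-- ===== SOURCE A (Python) =====
-- def run_stats(array):
--     total = 0
--     empty = 0
--     for seq in array:
--         for frame in seq:
--             if frame:
--                 total += 1
--             else:
--                 empty += 1
--             # for coord in frame:
--
--     return empty, total
-- ===== SOURCE B (Python) =====
-- def run_stats(array):
--     # Recursive over the outer list; per sequence, counts empty frames with
--     # list.count([]) and gets non-empty by len-subtraction (no per-frame branch).
--     if not array:
--         return (0, 0)
--     seq = array[0]
--     e, t = run_stats(array[1:])
--     ee = seq.count([])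
--     return (e + ee, t + len(seq) - ee)
-- ===== Notes on version B (the rewrite author's own statement) =====
-- stated objective: alternative
-- what changed: Replaces the nested counting loops by structural recursion on the outer list, computing each sequence's empty count with list.count([]) and its non-empty count by length subtraction, so no per-frame truthiness branch or second accumulator exists.
import Mathlib
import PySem

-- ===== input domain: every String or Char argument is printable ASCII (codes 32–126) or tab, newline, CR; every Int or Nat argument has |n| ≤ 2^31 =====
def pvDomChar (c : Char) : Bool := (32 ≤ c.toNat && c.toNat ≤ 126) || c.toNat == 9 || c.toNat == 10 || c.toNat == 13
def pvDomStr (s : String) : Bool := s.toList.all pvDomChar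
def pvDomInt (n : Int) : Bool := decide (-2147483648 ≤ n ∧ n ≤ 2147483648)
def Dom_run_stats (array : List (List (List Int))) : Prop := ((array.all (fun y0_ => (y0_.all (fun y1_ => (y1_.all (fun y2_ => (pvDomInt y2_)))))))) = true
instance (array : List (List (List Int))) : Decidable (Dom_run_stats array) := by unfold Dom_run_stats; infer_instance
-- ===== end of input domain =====

-- B replaces the nested counting loops by structural recursion using list.count([]) and length subtraction per sequence (objective: alternative decomposition, same cost).

-- ===== PORT A =====
-- literal port of A: nested fold over seqs and frames maintaining (total, empty); returns (empty, total)
def run_stats (array : List (List (List Int))) : Int × Int :=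
  let st := array.foldl (fun st seq =>
    seq.foldl (fun st frame =>
      if !frame.isEmpty then (st.1 + 1, st.2) else (st.1, st.2 + 1)) st) ((0 : Int), (0 : Int))
  (st.2, st.1)

-- ===== PORT B =====
-- port of Source B: recursion on the outer list; empty frames via count [], non-empty via len - count
def run_stats_alt : List (List (List Int)) → Int × Int
  | [] => (0, 0)
  | seq :: rest =>
    let p := run_stats_alt rest
    let ee : Int := PySem.List.count seq []
    (p.1 + ee, p.2 + (seq.length : Int) - ee)

-- ===== PRECONDITION & SPEC =====
def Spec_run_stats (array : List (List (List Int))) (out : Int × Int) : Prop := out = run_stats_alt array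
instance (array : List (List (List Int))) (out : Int × Int) : Decidable (Spec_run_stats array out) := by unfold Spec_run_stats; infer_instance

-- ===== CLAIM (what is proved, stated in full; the proofs are below) =====
def Claim_equal_run_stats : Prop := ∀ (array : List (List (List Int))), Dom_run_stats array → Spec_run_stats array (run_stats array)

-- ===== LEMMAS AND PROOFS =====
theorem inner_fold_count (seq : List (List Int)) (t e : Int) :
    seq.foldl (fun st frame =>
      if !frame.isEmpty then (st.1 + 1, st.2) else (st.1, st.2 + 1)) (t, e)
    = (t + (seq.length : Int) - (seq.count [] : Int), e + (seq.count [] : Int)) := by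
  induction seq generalizing t e with
  | nil => simp
  | cons h tl ih =>
    rw [List.foldl_cons]
    by_cases hh : h.isEmpty
    · have h0 : h = [] := List.isEmpty_iff.mp hh
      rw [show (if (!h.isEmpty) = true then ((t : Int) + 1, e) else (t, e + 1)) = (t, e + 1)
          from by simp [hh], ih]
      simp [h0]
      constructor <;> ring
    · have h0 : h ≠ [] := by simpa [List.isEmpty_iff] using hh
      rw [show (if (!h.isEmpty) = true then ((t : Int) + 1, e) else (t, e + 1)) = (t + 1, e)
          from by simp [hh], ih]
      simp [h0]
      ring

theorem outer_fold_eq (array : List (List (List Int))) (t e : Int) :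
    array.foldl (fun st seq =>
      seq.foldl (fun st frame =>
        if !frame.isEmpty then (st.1 + 1, st.2) else (st.1, st.2 + 1)) st) (t, e)
    = (t + (run_stats_alt array).2, e + (run_stats_alt array).1) := by
  induction array generalizing t e with
  | nil => simp [run_stats_alt]
  | cons h tl ih =>
    rw [List.foldl_cons, inner_fold_count, ih]
    simp [run_stats_alt, PySem.List.count_eq]
    constructor <;> ring

-- ===== VERDICT (by name: the statement is the Claim_ definition above) =====
theorem run_stats_spec : Claim_equal_run_stats := by
  intro array _
  unfold Spec_run_stats run_stats
  rw [outer_fold_eq]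
  simp
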